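-- pv_equiv track=rewrite | github.com/maxbaydi/ai-part-generator | bridge/prompt_builder.py | extract_key_from_chord_map
-- ===== SOURCE A (Python) =====
-- from typing import Any, Dict, List, Optional, Tuple
--
-- def extract_key_from_chord_map(chord_map: Optional[List[Dict[str, Any]]]) -> str:
--     if not chord_map or not isinstance(chord_map, list) or not chord_map:
--         return "unknown"
--
--     first_chord = chord_map[0]
--     if not isinstance(first_chord, dict):
--         return "unknown"
--
--     chord_name = first_chord.get("chord", "")
--     if not chord_name:
--         return "unknown"
--
--     chord_str = str(chord_name).strip()
--
--     root_map = {
--         "C": "C", "C#": "C#", "Db": "Db", "D": "D", "D#": "D#", "Eb": "Eb",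
--         "E": "E", "F": "F", "F#": "F#", "Gb": "Gb", "G": "G", "G#": "G#",
--         "Ab": "Ab", "A": "A", "A#": "A#", "Bb": "Bb", "B": "B",
--     }
--
--     root = ""
--     for r in ["C#", "Db", "D#", "Eb", "F#", "Gb", "G#", "Ab", "A#", "Bb", "C", "D", "E", "F", "G", "A", "B"]:
--         if chord_str.startswith(r):
--             root = root_map.get(r, r)
--             suffix = chord_str[len(r):].lower()
--             break
--
--     if not root:
--         return "unknown"
--
--     if "m" in suffix and "maj" not in suffix:
--         return f"{root} minor"
--     return f"{root} major"
-- ===== SOURCE B (Python) =====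
-- from typing import Any, Dict, List, Optional
--
-- def _first_chord_name(chord_map):
--     if not chord_map or not isinstance(chord_map, list):
--         return None
--     first = chord_map[0]
--     if not isinstance(first, dict):
--         return None
--     name = str(first.get("chord", "")).strip()
--     return name or None
--
-- def _parse_root(name):
--     # Rule-based parsing instead of scanning an enumerated root table:
--     # the root is a letter in the range A-G, optionally followed by an
--     # accidental that forms a standard enharmonic root ('#' on any letter
--     # except E and B; 'b' on any letter except C and F).
--     if not name or not ("A" <= name[0] <= "G"):
--         return None
--     letter, rest = name[0], name[1:]
--     if rest[:1] == "#" and letter not in "EB":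
--         return letter + "#", rest[1:]
--     if rest[:1] == "b" and letter not in "CF":
--         return letter + "b", rest[1:]
--     return letter, rest
--
-- def extract_key_from_chord_map(chord_map: Optional[List[Dict[str, Any]]]) -> str:
--     name = _first_chord_name(chord_map)
--     if name is None:
--         return "unknown"
--     parsed = _parse_root(name)
--     if parsed is None:
--         return "unknown"
--     root, suffix = parsed[0], parsed[1].lower()
--     if "m" in suffix and "maj" not in suffix:
--         return f"{root} minor"
--     return f"{root} major"
-- ===== Notes on version B (the rewrite author's own statement) =====
-- stated objective: simpler
-- what changed: Replaces A's priority scan over the enumerated 17-entry root list (plus the identity root_map lookup) with rule-based parsing: the root letter is recognised by the character range A-G and the accidental by a character-class rule ('#' on any letter except E/B, 'b' on any letter except C/F), so no root table or scan exists in B.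
import Mathlib
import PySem

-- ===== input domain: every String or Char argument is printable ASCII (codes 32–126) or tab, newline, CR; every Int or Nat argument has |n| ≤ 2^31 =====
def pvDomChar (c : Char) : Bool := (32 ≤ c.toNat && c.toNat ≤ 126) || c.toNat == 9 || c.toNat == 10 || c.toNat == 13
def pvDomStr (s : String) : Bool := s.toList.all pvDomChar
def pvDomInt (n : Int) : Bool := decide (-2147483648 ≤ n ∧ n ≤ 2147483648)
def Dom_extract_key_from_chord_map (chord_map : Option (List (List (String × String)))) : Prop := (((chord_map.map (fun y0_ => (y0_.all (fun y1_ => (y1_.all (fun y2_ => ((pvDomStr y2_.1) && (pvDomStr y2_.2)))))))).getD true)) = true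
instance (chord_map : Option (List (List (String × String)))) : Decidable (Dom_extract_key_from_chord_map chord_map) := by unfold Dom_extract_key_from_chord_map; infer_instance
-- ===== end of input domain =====

-- B replaces A's priority scan over the enumerated 17-root list by rule-based parsing
-- (letter in the range A-G, then an accidental admitted by a character-class rule);
-- objective: simpler. Same return value everywhere.

-- ===== PORT A =====
-- A's ordered root list (the loop's iteration order: all two-char roots first, then singles)
def pvRootsA : List String :=
  ["C#", "Db", "D#", "Eb", "F#", "Gb", "G#", "Ab", "A#", "Bb", "C", "D", "E", "F", "G", "A", "B"]

-- A's identity root_map (faithfully ported; root_map.get(r, r))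
def pvRootMapA : PySem.Dict String String :=
  PySem.Dict.mk [("C", "C"), ("C#", "C#"), ("Db", "Db"), ("D", "D"), ("D#", "D#"), ("Eb", "Eb"),
   ("E", "E"), ("F", "F"), ("F#", "F#"), ("Gb", "Gb"), ("G", "G"), ("G#", "G#"),
   ("Ab", "Ab"), ("A#", "A#"), ("Bb", "Bb"), ("B", "B")]

-- A's for-loop with break: the first r the chord starts with, returning (root, suffix.lower())
def pvFindRootA (cs : List Char) : List String → Option (String × List Char)
  | [] => none
  | r :: rest =>
      if PySem.Chars.startswith cs r.toList then
        some (PySem.Dict.getD pvRootMapA r r,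
              PySem.Chars.lower (PySem.Chars.slice cs (some (r.toList.length : Int)) none))
      else pvFindRootA cs rest

-- the code after the loop (root empty → "unknown"; minor/major check)
def pvFinishA : Option (String × List Char) → String
  | none => "unknown"
  | some (root, suffix) =>
      if PySem.Chars.isIn ['m'] suffix && !PySem.Chars.isIn ['m', 'a', 'j'] suffix then
        root ++ " minor"
      else root ++ " major"

def pvKeyA (cs : List Char) : String := pvFinishA (pvFindRootA cs pvRootsA)

-- isinstance checks are vacuous under the Lean types and are dropped
def extract_key_from_chord_map (chord_map : Option (List (List (String × String)))) : String :=
  match chord_map with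
  | none => "unknown"
  | some [] => "unknown"
  | some (first_chord :: _) =>
      let chord_name := PySem.Dict.getD (PySem.Dict.mk first_chord) "chord" ""
      if chord_name = "" then "unknown"
      else pvKeyA (PySem.Chars.strip chord_name.toList)

-- ===== PORT B =====
-- B's _first_chord_name: the stripped chord name of the first entry, or none
def pvFirstChordNameB (chord_map : Option (List (List (String × String)))) : Option (List Char) :=
  match chord_map with
  | none => none
  | some [] => none
  | some (first :: _) =>
      let name := PySem.Chars.strip (PySem.Dict.getD (PySem.Dict.mk first) "chord" "").toList
      if name.isEmpty then none else some name

-- B's _parse_root: '"A" <= name[0] <= "G"' is the Char range check; 'letter not in "EB"' /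
-- 'letter not in "CF"' are ported as the disjunction over the two characters; rest[:1]/rest[1:] via slices
def pvParseRootB (name : List Char) : Option (String × List Char) :=
  match name with
  | [] => none
  | c :: rest =>
      if 'A' ≤ c ∧ c ≤ 'G' then
        if PySem.Chars.slice rest none (some 1) = ['#'] ∧ ¬ (c = 'E' ∨ c = 'B') then
          some (String.ofList [c, '#'], PySem.Chars.slice rest (some 1) none)
        else if PySem.Chars.slice rest none (some 1) = ['b'] ∧ ¬ (c = 'C' ∨ c = 'F') then
          some (String.ofList [c, 'b'], PySem.Chars.slice rest (some 1) none)
        else some (String.ofList [c], rest)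
      else none

def pvKeyB (name : List Char) : String :=
  match pvParseRootB name with
  | none => "unknown"
  | some (root, rest) =>
      let suffix := PySem.Chars.lower rest
      if PySem.Chars.isIn ['m'] suffix && !PySem.Chars.isIn ['m', 'a', 'j'] suffix then
        root ++ " minor"
      else root ++ " major"

def extract_key_from_chord_map_alt (chord_map : Option (List (List (String × String)))) : String :=
  match pvFirstChordNameB chord_map with
  | none => "unknown"
  | some name => pvKeyB name

-- ===== PRECONDITION & SPEC =====
def Spec_extract_key_from_chord_map (chord_map : Option (List (List (String × String)))) (out : String) : Prop := out = extract_key_from_chord_map_alt chord_map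
instance (chord_map : Option (List (List (String × String)))) (out : String) : Decidable (Spec_extract_key_from_chord_map chord_map out) := by unfold Spec_extract_key_from_chord_map; infer_instance

-- ===== CLAIM (what is proved, stated in full; the proofs are below) =====
def Claim_equal_extract_key_from_chord_map : Prop := ∀ (chord_map : Option (List (List (String × String)))), Dom_extract_key_from_chord_map chord_map → Spec_extract_key_from_chord_map chord_map (extract_key_from_chord_map chord_map)

-- ===== LEMMAS AND PROOFS =====

lemma char_range_AG (a : Char) : ('A' ≤ a ∧ a ≤ 'G') ↔ (a = 'A' ∨ a = 'B' ∨ a = 'C' ∨ a = 'D' ∨ a = 'E' ∨ a = 'F' ∨ a = 'G') := by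
  constructor
  · rintro ⟨h1, h2⟩
    have v1 : ('A' : Char).val ≤ a.val := h1
    have v2 : a.val ≤ ('G' : Char).val := h2
    have n1 : (65 : Nat) ≤ a.val.toNat := by simpa using v1
    have n2 : a.val.toNat ≤ 71 := by simpa using v2
    have hd : a.val.toNat = 65 ∨ a.val.toNat = 66 ∨ a.val.toNat = 67 ∨ a.val.toNat = 68 ∨
        a.val.toNat = 69 ∨ a.val.toNat = 70 ∨ a.val.toNat = 71 := by omega
    have ext : ∀ (n : Char), a.val.toNat = n.val.toNat → a = n :=
      fun n hn => Char.ext (UInt32.toNat_inj.mp hn)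
    rcases hd with h|h|h|h|h|h|h
    · exact Or.inl (ext 'A' (by simpa using h))
    · exact Or.inr (Or.inl (ext 'B' (by simpa using h)))
    · exact Or.inr (Or.inr (Or.inl (ext 'C' (by simpa using h))))
    · exact Or.inr (Or.inr (Or.inr (Or.inl (ext 'D' (by simpa using h)))))
    · exact Or.inr (Or.inr (Or.inr (Or.inr (Or.inl (ext 'E' (by simpa using h))))))
    · exact Or.inr (Or.inr (Or.inr (Or.inr (Or.inr (Or.inl (ext 'F' (by simpa using h)))))))
    · exact Or.inr (Or.inr (Or.inr (Or.inr (Or.inr (Or.inr (ext 'G' (by simpa using h)))))))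
  · rintro (rfl|rfl|rfl|rfl|rfl|rfl|rfl) <;> exact ⟨by decide, by decide⟩

lemma key_eq_A (b : Char) (t : List Char) : pvKeyA ('A' :: b :: t) = pvKeyB ('A' :: b :: t) := by
  have hs1 : PySem.List.slice (b::t) none (some 1) = [b] := by
    simp [PySem.List.slice, PySem.List.clampIdx]
  have hs2 : PySem.List.slice (b::t) (some 1) none = t := by
    simp [PySem.List.slice, PySem.List.clampIdx]
  have ha2 : PySem.List.slice ('A'::b::t) (some 2) none = t := by
    simp [PySem.List.slice, PySem.List.clampIdx]
  have ha1 : PySem.List.slice ('A'::b::t) (some 1) none = b::t := by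
    simp [PySem.List.slice, PySem.List.clampIdx]
  by_cases hb : b = '#'
  · subst hb
    simp [pvKeyA, pvKeyB, pvFindRootA, pvRootsA, pvFinishA, pvParseRootB,
      PySem.Chars.startswith, PySem.Chars.slice_eq_listSlice, hs1, hs2, ha2, ha1, show pvRootMapA.getD "A" "A" = "A" from rfl, show pvRootMapA.getD "A#" "A#" = "A#" from rfl, show pvRootMapA.getD "Ab" "Ab" = "Ab" from rfl]
  · by_cases hb2 : b = 'b'
    · subst hb2
      simp [pvKeyA, pvKeyB, pvFindRootA, pvRootsA, pvFinishA, pvParseRootB,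
        PySem.Chars.startswith, PySem.Chars.slice_eq_listSlice, hs1, hs2, ha2, ha1, show pvRootMapA.getD "A" "A" = "A" from rfl, show pvRootMapA.getD "A#" "A#" = "A#" from rfl, show pvRootMapA.getD "Ab" "Ab" = "Ab" from rfl]
    · simp [pvKeyA, pvKeyB, pvFindRootA, pvRootsA, pvFinishA, pvParseRootB,
        PySem.Chars.startswith, PySem.Chars.slice_eq_listSlice, hs1, hs2, ha2, ha1,
        hb, hb2, Ne.symm hb, Ne.symm hb2, show pvRootMapA.getD "A" "A" = "A" from rfl, show pvRootMapA.getD "A#" "A#" = "A#" from rfl, show pvRootMapA.getD "Ab" "Ab" = "Ab" from rfl]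

lemma key_eq_B (b : Char) (t : List Char) : pvKeyA ('B' :: b :: t) = pvKeyB ('B' :: b :: t) := by
  have hs1 : PySem.List.slice (b::t) none (some 1) = [b] := by
    simp [PySem.List.slice, PySem.List.clampIdx]
  have hs2 : PySem.List.slice (b::t) (some 1) none = t := by
    simp [PySem.List.slice, PySem.List.clampIdx]
  have ha2 : PySem.List.slice ('B'::b::t) (some 2) none = t := by
    simp [PySem.List.slice, PySem.List.clampIdx]
  have ha1 : PySem.List.slice ('B'::b::t) (some 1) none = b::t := by
    simp [PySem.List.slice, PySem.List.clampIdx]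
  by_cases hb : b = '#'
  · subst hb
    simp [pvKeyA, pvKeyB, pvFindRootA, pvRootsA, pvFinishA, pvParseRootB,
      PySem.Chars.startswith, PySem.Chars.slice_eq_listSlice, hs1, hs2, ha2, ha1, show pvRootMapA.getD "B" "B" = "B" from rfl, show pvRootMapA.getD "Bb" "Bb" = "Bb" from rfl]
  · by_cases hb2 : b = 'b'
    · subst hb2
      simp [pvKeyA, pvKeyB, pvFindRootA, pvRootsA, pvFinishA, pvParseRootB,
        PySem.Chars.startswith, PySem.Chars.slice_eq_listSlice, hs1, hs2, ha2, ha1, show pvRootMapA.getD "B" "B" = "B" from rfl, show pvRootMapA.getD "Bb" "Bb" = "Bb" from rfl]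
    · simp [pvKeyA, pvKeyB, pvFindRootA, pvRootsA, pvFinishA, pvParseRootB,
        PySem.Chars.startswith, PySem.Chars.slice_eq_listSlice, hs1, hs2, ha2, ha1,
        hb, hb2, Ne.symm hb, Ne.symm hb2, show pvRootMapA.getD "B" "B" = "B" from rfl, show pvRootMapA.getD "Bb" "Bb" = "Bb" from rfl]

lemma key_eq_C (b : Char) (t : List Char) : pvKeyA ('C' :: b :: t) = pvKeyB ('C' :: b :: t) := by
  have hs1 : PySem.List.slice (b::t) none (some 1) = [b] := by
    simp [PySem.List.slice, PySem.List.clampIdx]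
  have hs2 : PySem.List.slice (b::t) (some 1) none = t := by
    simp [PySem.List.slice, PySem.List.clampIdx]
  have ha2 : PySem.List.slice ('C'::b::t) (some 2) none = t := by
    simp [PySem.List.slice, PySem.List.clampIdx]
  have ha1 : PySem.List.slice ('C'::b::t) (some 1) none = b::t := by
    simp [PySem.List.slice, PySem.List.clampIdx]
  by_cases hb : b = '#'
  · subst hb
    simp [pvKeyA, pvKeyB, pvFindRootA, pvRootsA, pvFinishA, pvParseRootB,
      PySem.Chars.startswith, PySem.Chars.slice_eq_listSlice, hs1, hs2, ha2, ha1, show pvRootMapA.getD "C" "C" = "C" from rfl, show pvRootMapA.getD "C#" "C#" = "C#" from rfl]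
  · by_cases hb2 : b = 'b'
    · subst hb2
      simp [pvKeyA, pvKeyB, pvFindRootA, pvRootsA, pvFinishA, pvParseRootB,
        PySem.Chars.startswith, PySem.Chars.slice_eq_listSlice, hs1, hs2, ha2, ha1, show pvRootMapA.getD "C" "C" = "C" from rfl, show pvRootMapA.getD "C#" "C#" = "C#" from rfl]
    · simp [pvKeyA, pvKeyB, pvFindRootA, pvRootsA, pvFinishA, pvParseRootB,
        PySem.Chars.startswith, PySem.Chars.slice_eq_listSlice, hs1, hs2, ha2, ha1,
        hb, hb2, Ne.symm hb, Ne.symm hb2, show pvRootMapA.getD "C" "C" = "C" from rfl, show pvRootMapA.getD "C#" "C#" = "C#" from rfl]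

lemma key_eq_D (b : Char) (t : List Char) : pvKeyA ('D' :: b :: t) = pvKeyB ('D' :: b :: t) := by
  have hs1 : PySem.List.slice (b::t) none (some 1) = [b] := by
    simp [PySem.List.slice, PySem.List.clampIdx]
  have hs2 : PySem.List.slice (b::t) (some 1) none = t := by
    simp [PySem.List.slice, PySem.List.clampIdx]
  have ha2 : PySem.List.slice ('D'::b::t) (some 2) none = t := by
    simp [PySem.List.slice, PySem.List.clampIdx]
  have ha1 : PySem.List.slice ('D'::b::t) (some 1) none = b::t := by
    simp [PySem.List.slice, PySem.List.clampIdx]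
  by_cases hb : b = '#'
  · subst hb
    simp [pvKeyA, pvKeyB, pvFindRootA, pvRootsA, pvFinishA, pvParseRootB,
      PySem.Chars.startswith, PySem.Chars.slice_eq_listSlice, hs1, hs2, ha2, ha1, show pvRootMapA.getD "D" "D" = "D" from rfl, show pvRootMapA.getD "D#" "D#" = "D#" from rfl, show pvRootMapA.getD "Db" "Db" = "Db" from rfl]
  · by_cases hb2 : b = 'b'
    · subst hb2
      simp [pvKeyA, pvKeyB, pvFindRootA, pvRootsA, pvFinishA, pvParseRootB,
        PySem.Chars.startswith, PySem.Chars.slice_eq_listSlice, hs1, hs2, ha2, ha1, show pvRootMapA.getD "D" "D" = "D" from rfl, show pvRootMapA.getD "D#" "D#" = "D#" from rfl, show pvRootMapA.getD "Db" "Db" = "Db" from rfl]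
    · simp [pvKeyA, pvKeyB, pvFindRootA, pvRootsA, pvFinishA, pvParseRootB,
        PySem.Chars.startswith, PySem.Chars.slice_eq_listSlice, hs1, hs2, ha2, ha1,
        hb, hb2, Ne.symm hb, Ne.symm hb2, show pvRootMapA.getD "D" "D" = "D" from rfl, show pvRootMapA.getD "D#" "D#" = "D#" from rfl, show pvRootMapA.getD "Db" "Db" = "Db" from rfl]

lemma key_eq_E (b : Char) (t : List Char) : pvKeyA ('E' :: b :: t) = pvKeyB ('E' :: b :: t) := by
  have hs1 : PySem.List.slice (b::t) none (some 1) = [b] := by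
    simp [PySem.List.slice, PySem.List.clampIdx]
  have hs2 : PySem.List.slice (b::t) (some 1) none = t := by
    simp [PySem.List.slice, PySem.List.clampIdx]
  have ha2 : PySem.List.slice ('E'::b::t) (some 2) none = t := by
    simp [PySem.List.slice, PySem.List.clampIdx]
  have ha1 : PySem.List.slice ('E'::b::t) (some 1) none = b::t := by
    simp [PySem.List.slice, PySem.List.clampIdx]
  by_cases hb : b = '#'
  · subst hb
    simp [pvKeyA, pvKeyB, pvFindRootA, pvRootsA, pvFinishA, pvParseRootB,
      PySem.Chars.startswith, PySem.Chars.slice_eq_listSlice, hs1, hs2, ha2, ha1, show pvRootMapA.getD "E" "E" = "E" from rfl, show pvRootMapA.getD "Eb" "Eb" = "Eb" from rfl]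
  · by_cases hb2 : b = 'b'
    · subst hb2
      simp [pvKeyA, pvKeyB, pvFindRootA, pvRootsA, pvFinishA, pvParseRootB,
        PySem.Chars.startswith, PySem.Chars.slice_eq_listSlice, hs1, hs2, ha2, ha1, show pvRootMapA.getD "E" "E" = "E" from rfl, show pvRootMapA.getD "Eb" "Eb" = "Eb" from rfl]
    · simp [pvKeyA, pvKeyB, pvFindRootA, pvRootsA, pvFinishA, pvParseRootB,
        PySem.Chars.startswith, PySem.Chars.slice_eq_listSlice, hs1, hs2, ha2, ha1,
        hb, hb2, Ne.symm hb, Ne.symm hb2, show pvRootMapA.getD "E" "E" = "E" from rfl, show pvRootMapA.getD "Eb" "Eb" = "Eb" from rfl]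

lemma key_eq_F (b : Char) (t : List Char) : pvKeyA ('F' :: b :: t) = pvKeyB ('F' :: b :: t) := by
  have hs1 : PySem.List.slice (b::t) none (some 1) = [b] := by
    simp [PySem.List.slice, PySem.List.clampIdx]
  have hs2 : PySem.List.slice (b::t) (some 1) none = t := by
    simp [PySem.List.slice, PySem.List.clampIdx]
  have ha2 : PySem.List.slice ('F'::b::t) (some 2) none = t := by
    simp [PySem.List.slice, PySem.List.clampIdx]
  have ha1 : PySem.List.slice ('F'::b::t) (some 1) none = b::t := by
    simp [PySem.List.slice, PySem.List.clampIdx]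
  by_cases hb : b = '#'
  · subst hb
    simp [pvKeyA, pvKeyB, pvFindRootA, pvRootsA, pvFinishA, pvParseRootB,
      PySem.Chars.startswith, PySem.Chars.slice_eq_listSlice, hs1, hs2, ha2, ha1, show pvRootMapA.getD "F" "F" = "F" from rfl, show pvRootMapA.getD "F#" "F#" = "F#" from rfl]
  · by_cases hb2 : b = 'b'
    · subst hb2
      simp [pvKeyA, pvKeyB, pvFindRootA, pvRootsA, pvFinishA, pvParseRootB,
        PySem.Chars.startswith, PySem.Chars.slice_eq_listSlice, hs1, hs2, ha2, ha1, show pvRootMapA.getD "F" "F" = "F" from rfl, show pvRootMapA.getD "F#" "F#" = "F#" from rfl]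
    · simp [pvKeyA, pvKeyB, pvFindRootA, pvRootsA, pvFinishA, pvParseRootB,
        PySem.Chars.startswith, PySem.Chars.slice_eq_listSlice, hs1, hs2, ha2, ha1,
        hb, hb2, Ne.symm hb, Ne.symm hb2, show pvRootMapA.getD "F" "F" = "F" from rfl, show pvRootMapA.getD "F#" "F#" = "F#" from rfl]

lemma key_eq_G (b : Char) (t : List Char) : pvKeyA ('G' :: b :: t) = pvKeyB ('G' :: b :: t) := by
  have hs1 : PySem.List.slice (b::t) none (some 1) = [b] := by
    simp [PySem.List.slice, PySem.List.clampIdx]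
  have hs2 : PySem.List.slice (b::t) (some 1) none = t := by
    simp [PySem.List.slice, PySem.List.clampIdx]
  have ha2 : PySem.List.slice ('G'::b::t) (some 2) none = t := by
    simp [PySem.List.slice, PySem.List.clampIdx]
  have ha1 : PySem.List.slice ('G'::b::t) (some 1) none = b::t := by
    simp [PySem.List.slice, PySem.List.clampIdx]
  by_cases hb : b = '#'
  · subst hb
    simp [pvKeyA, pvKeyB, pvFindRootA, pvRootsA, pvFinishA, pvParseRootB,
      PySem.Chars.startswith, PySem.Chars.slice_eq_listSlice, hs1, hs2, ha2, ha1, show pvRootMapA.getD "G" "G" = "G" from rfl, show pvRootMapA.getD "G#" "G#" = "G#" from rfl, show pvRootMapA.getD "Gb" "Gb" = "Gb" from rfl]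
  · by_cases hb2 : b = 'b'
    · subst hb2
      simp [pvKeyA, pvKeyB, pvFindRootA, pvRootsA, pvFinishA, pvParseRootB,
        PySem.Chars.startswith, PySem.Chars.slice_eq_listSlice, hs1, hs2, ha2, ha1, show pvRootMapA.getD "G" "G" = "G" from rfl, show pvRootMapA.getD "G#" "G#" = "G#" from rfl, show pvRootMapA.getD "Gb" "Gb" = "Gb" from rfl]
    · simp [pvKeyA, pvKeyB, pvFindRootA, pvRootsA, pvFinishA, pvParseRootB,
        PySem.Chars.startswith, PySem.Chars.slice_eq_listSlice, hs1, hs2, ha2, ha1,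
        hb, hb2, Ne.symm hb, Ne.symm hb2, show pvRootMapA.getD "G" "G" = "G" from rfl, show pvRootMapA.getD "G#" "G#" = "G#" from rfl, show pvRootMapA.getD "Gb" "Gb" = "Gb" from rfl]

lemma key_eq_non (a : Char) (rest : List Char) (h : ¬ ('A' ≤ a ∧ a ≤ 'G')) : pvKeyA (a :: rest) = pvKeyB (a :: rest) := by
  have h7 : ¬ (a = 'A' ∨ a = 'B' ∨ a = 'C' ∨ a = 'D' ∨ a = 'E' ∨ a = 'F' ∨ a = 'G') :=
    fun hx => h ((char_range_AG a).mpr hx)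
  push Not at h7
  obtain ⟨hA, hB, hC, hD, hE, hF, hG⟩ := h7
  simp [pvKeyA, pvKeyB, pvFindRootA, pvRootsA, pvFinishA, pvParseRootB,
    PySem.Chars.startswith, h, hA, hB, hC, hD, hE, hF, hG,
    Ne.symm hA, Ne.symm hB, Ne.symm hC, Ne.symm hD, Ne.symm hE, Ne.symm hF, Ne.symm hG]

lemma key_eq (cs : List Char) : pvKeyA cs = pvKeyB cs := by
  match cs with
  | [] => decide
  | [a] =>
      by_cases h : ('A' ≤ a ∧ a ≤ 'G')
      · rcases (char_range_AG a).mp h with rfl|rfl|rfl|rfl|rfl|rfl|rfl <;> decide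
      · exact key_eq_non a [] h
  | a :: b :: t =>
      by_cases h : ('A' ≤ a ∧ a ≤ 'G')
      · rcases (char_range_AG a).mp h with rfl|rfl|rfl|rfl|rfl|rfl|rfl
        · exact key_eq_A b t
        · exact key_eq_B b t
        · exact key_eq_C b t
        · exact key_eq_D b t
        · exact key_eq_E b t
        · exact key_eq_F b t
        · exact key_eq_G b t
      · exact key_eq_non a (b :: t) h


-- ===== VERDICT (by name: the statement is the Claim_ definition above) =====
theorem extract_key_from_chord_map_spec : Claim_equal_extract_key_from_chord_map := by
  intro chord_map _
  unfold Spec_extract_key_from_chord_map extract_key_from_chord_map extract_key_from_chord_map_alt pvFirstChordNameB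
  match chord_map with
  | none => rfl
  | some [] => rfl
  | some (first :: _) =>
      by_cases h : PySem.Dict.getD (PySem.Dict.mk first) "chord" "" = ""
      · have he : PySem.Chars.strip ([] : List Char) = [] := by decide
        simp [h, he]
      · simp only [if_neg h]
        by_cases hn : (PySem.Chars.strip (PySem.Dict.getD (PySem.Dict.mk first) "chord" "").toList).isEmpty
        · rw [List.isEmpty_iff] at hn
          rw [hn]
          simp [pvKeyA, pvFindRootA, pvRootsA, pvFinishA, PySem.Chars.startswith]
        · simp only [hn, Bool.false_eq_true, if_false]
          exact key_eq _
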